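-- pv_equiv track=rewrite | github.com/Iamnotzzz/rubbish | 252's ai project/lab2-2/mgu.py | parse_atom
-- ===== SOURCE A (Python) =====
-- def parse_atom(atom):
--     """解析原子公式为谓词和参数列表，正确处理嵌套括号"""
--     atom = atom.replace(' ', '')  # 去除空格
--     if ('(' not in atom):
--         return (atom, [])
--
--     # 分离谓词和参数字符串
--     pred_end = atom.find('(')
--     pred = atom[:pred_end]
--     args_str = atom[pred_end + 1:-1]  # 去掉最外层括号
--
--     # 智能分割参数，考虑嵌套括号
--     args = []
--     current_arg = ""
--     paren_level = 0
--
--     for char in args_str: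
--         if char == ',' and paren_level == 0:
--             args.append(current_arg)
--             current_arg = ""
--         else:
--             if char == '(':
--                 paren_level += 1
--             elif char == ')':
--                 paren_level -= 1
--             current_arg += char
--
--     if current_arg:
--         args.append(current_arg)
--
--     return (pred, args)
-- ===== SOURCE B (Python) =====
-- def _find_comma(s):
--     """Return (text before the first top-level comma, text after it), or None."""
--     depth = 0
--     for i, ch in enumerate(s):
--         if ch == ',' and depth == 0:
--             return (s[:i], s[i + 1:])
--         if ch == '(':
--             depth += 1
--         elif ch == ')':
--             depth -= 1
--     return None
--
--
-- def _split_top(s):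
--     """Cut s into the whole segments between top-level commas (empties kept)."""
--     segs = []
--     while True:
--         found = _find_comma(s)
--         if found is None:
--             segs.append(s)
--             return segs
--         pre, s = found
--         segs.append(pre)
--
--
-- def parse_atom(atom):
--     atom = atom.replace(' ', '')
--     if '(' not in atom:
--         return (atom, [])
--     i = atom.find('(')
--     pred = atom[:i]
--     args_str = atom[i + 1:-1]
--     segs = _split_top(args_str)
--     if segs[-1] == "":
--         segs = segs[:-1]
--     return (pred, segs)
-- ===== Notes on version B (the rewrite author's own statement) =====
-- stated objective: alternative
-- what changed: Instead of one character loop threading an (args, current_arg, paren_level) accumulator and conditionally appending the last piece, B repeatedly finds the next top-level comma and slices off whole segments (keeping empty intermediate ones), then drops a single trailing empty segment.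
import Mathlib
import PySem

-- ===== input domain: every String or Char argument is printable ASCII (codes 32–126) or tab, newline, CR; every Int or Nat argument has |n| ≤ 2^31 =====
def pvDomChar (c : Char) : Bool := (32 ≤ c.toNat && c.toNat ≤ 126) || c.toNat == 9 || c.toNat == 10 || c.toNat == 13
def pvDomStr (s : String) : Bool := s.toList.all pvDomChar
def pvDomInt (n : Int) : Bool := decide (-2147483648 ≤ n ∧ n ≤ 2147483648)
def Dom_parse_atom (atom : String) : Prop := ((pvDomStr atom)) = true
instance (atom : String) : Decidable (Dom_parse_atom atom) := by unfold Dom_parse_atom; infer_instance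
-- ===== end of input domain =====

-- B re-implements the top-level comma split by repeatedly locating the next top-level
-- comma and slicing off whole segments, rather than A's single character loop threading an
-- (args, current_arg, paren_level) accumulator; same cost, different decomposition.

-- ===== PORT A =====
-- one loop step of A: state = (args, current_arg, paren_level)
def stepA (st : List (List Char) × List Char × Int) (c : Char) :
    List (List Char) × List Char × Int :=
  if c = ',' ∧ st.2.2 = 0 then (st.1 ++ [st.2.1], [], st.2.2)
  else
    let lvl := if c = '(' then st.2.2 + 1 else if c = ')' then st.2.2 - 1 else st.2.2
    (st.1, st.2.1 ++ [c], lvl)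

def parse_atom (atom : String) : String × List String :=
  let atom := PySem.Str.replace atom " " ""
  if !(PySem.Str.isIn "(" atom) then (atom, [])
  else
    let pred_end := PySem.Str.find atom "("
    let pred := PySem.Str.slice atom none (some pred_end)
    let args_str := PySem.Str.slice atom (some (pred_end + 1)) (some (-1))
    let r := args_str.toList.foldl stepA ([], [], 0)
    let args := if r.2.1 ≠ [] then r.1 ++ [r.2.1] else r.1
    (pred, args.map String.ofList)

-- ===== PORT B =====
-- _find_comma: (prefix before first top-level comma, suffix after it), or none
def findComma : List Char → Int → Option (List Char × List Char)
  | [], _ => none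
  | c :: cs, depth =>
    if c = ',' ∧ depth = 0 then some ([], cs)
    else
      let depth := if c = '(' then depth + 1 else if c = ')' then depth - 1 else depth
      match findComma cs depth with
      | some (p, r) => some (c :: p, r)
      | none => none

theorem findComma_length :
    ∀ (cs : List Char) (d : Int) (p r : List Char),
      findComma cs d = some (p, r) → r.length < cs.length := by
  intro cs
  induction cs with
  | nil => intro d p r h; simp [findComma] at h
  | cons c cs ih =>
    intro d p r h
    simp only [findComma] at h
    split at h
    · simp only [Option.some.injEq, Prod.mk.injEq] at h
      simp [← h.2]
    · cases hf : findComma cs (if c = '(' then d + 1 else if c = ')' then d - 1 else d) with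
      | none => rw [hf] at h; simp at h
      | some pr =>
        obtain ⟨p', r'⟩ := pr
        rw [hf] at h
        simp only [Option.some.injEq, Prod.mk.injEq] at h
        obtain ⟨hp, hr⟩ := h
        subst hr
        have := ih _ p' r' hf
        simp only [List.length_cons]
        omega

-- _split_top: while loop collecting segments
def splitTopGo (s : List Char) (segs : List (List Char)) : List (List Char) :=
  match h : findComma s 0 with
  | none => segs ++ [s]
  | some (pre, rest) => splitTopGo rest (segs ++ [pre])
termination_by s.length
decreasing_by exact findComma_length s 0 pre rest h

def parse_atom_alt (atom : String) : String × List String :=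
  let atom := PySem.Str.replace atom " " ""
  if !(PySem.Str.isIn "(" atom) then (atom, [])
  else
    let i := PySem.Str.find atom "("
    let pred := PySem.Str.slice atom none (some i)
    let args_str := PySem.Str.slice atom (some (i + 1)) (some (-1))
    let segs := splitTopGo args_str.toList []
    let segs := if segs.getLast? = some [] then segs.dropLast else segs
    (pred, segs.map String.ofList)

-- ===== PRECONDITION & SPEC =====
def Spec_parse_atom (atom : String) (out : String × List String) : Prop := out = parse_atom_alt atom
instance (atom : String) (out : String × List String) : Decidable (Spec_parse_atom atom out) := by unfold Spec_parse_atom; infer_instance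

-- ===== CLAIM (what is proved, stated in full; the proofs are below) =====
def Claim_equal_parse_atom : Prop := ∀ (atom : String), Dom_parse_atom atom → Spec_parse_atom atom (parse_atom atom)

-- ===== LEMMAS AND PROOFS =====

-- all segments between top-level commas, empties kept (always nonempty)
def fSeg (cs : List Char) (lvl : Int) : List (List Char) :=
  match cs with
  | [] => [[]]
  | c :: cs =>
    if c = ',' ∧ lvl = 0 then [] :: fSeg cs 0
    else
      match fSeg cs (if c = '(' then lvl + 1 else if c = ')' then lvl - 1 else lvl) with
      | s :: t => (c :: s) :: t
      | [] => []

-- the segments A ends up with: current prefix `cur`, trailing empty dropped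
def gSeg (cs : List Char) (lvl : Int) (cur : List Char) : List (List Char) :=
  match cs with
  | [] => if cur = [] then [] else [cur]
  | c :: cs =>
    if c = ',' ∧ lvl = 0 then cur :: gSeg cs 0 []
    else gSeg cs (if c = '(' then lvl + 1 else if c = ')' then lvl - 1 else lvl) (cur ++ [c])

def mapHead (g : List Char → List Char) : List (List Char) → List (List Char)
  | [] => []
  | x :: t => g x :: t

def dropT (l : List (List Char)) : List (List Char) :=
  if l.getLast? = some [] then l.dropLast else l

theorem fSeg_ne_nil (cs : List Char) (lvl : Int) : fSeg cs lvl ≠ [] := by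
  induction cs generalizing lvl with
  | nil => simp [fSeg]
  | cons c cs ih =>
    simp only [fSeg]
    split
    · simp
    · cases hf : fSeg cs (if c = '(' then lvl + 1 else if c = ')' then lvl - 1 else lvl) with
      | nil => exact absurd hf (ih _)
      | cons s t => simp

theorem A_loop (cs : List Char) :
    ∀ (args : List (List Char)) (cur : List Char) (lvl : Int),
      (let r := cs.foldl stepA (args, cur, lvl);
       if r.2.1 ≠ [] then r.1 ++ [r.2.1] else r.1) = args ++ gSeg cs lvl cur := by
  induction cs with
  | nil =>
    intro args cur lvl
    simp only [List.foldl_nil, gSeg]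
    split_ifs with h h2 <;> simp_all
  | cons c cs ih =>
    intro args cur lvl
    simp only [List.foldl_cons, gSeg, stepA]
    by_cases h : c = ',' ∧ lvl = 0
    · obtain ⟨hc, hl⟩ := h
      subst hl
      rw [if_pos (⟨hc, rfl⟩ : c = ',' ∧ (0 : Int) = 0)]
      have := ih (args ++ [cur]) [] 0
      simp only at this
      rw [this, List.append_assoc, List.singleton_append,
          if_pos (⟨hc, rfl⟩ : c = ',' ∧ (0 : Int) = 0)]
    · simp only [if_neg h]
      exact ih args (cur ++ [c]) _

theorem findComma_none_fSeg (cs : List Char) :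
    ∀ (lvl : Int), findComma cs lvl = none → fSeg cs lvl = [cs] := by
  induction cs with
  | nil => intro lvl _; simp [fSeg]
  | cons c cs ih =>
    intro lvl h
    simp only [findComma] at h
    simp only [fSeg]
    split at h
    · simp at h
    · rename_i hc
      rw [if_neg hc]
      cases hf : findComma cs (if c = '(' then lvl + 1 else if c = ')' then lvl - 1 else lvl) with
      | some pr => rw [hf] at h; simp at h
      | none => rw [ih _ hf]

theorem findComma_some_fSeg (cs : List Char) :
    ∀ (lvl : Int) (p r : List Char), findComma cs lvl = some (p, r) →
      fSeg cs lvl = p :: fSeg r 0 := by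
  induction cs with
  | nil => intro lvl p r h; simp [findComma] at h
  | cons c cs ih =>
    intro lvl p r h
    simp only [findComma] at h
    simp only [fSeg]
    split at h
    · rename_i hc
      simp only [Option.some.injEq, Prod.mk.injEq] at h
      rw [if_pos hc, ← h.1, ← h.2]
    · rename_i hc
      rw [if_neg hc]
      cases hf : findComma cs (if c = '(' then lvl + 1 else if c = ')' then lvl - 1 else lvl) with
      | none => rw [hf] at h; simp at h
      | some pr =>
        rw [hf] at h
        simp only [Option.some.injEq, Prod.mk.injEq] at h
        rw [ih _ pr.1 pr.2 (by rw [hf])]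
        rw [← h.1, ← h.2]

theorem splitTopGo_eq (n : Nat) :
    ∀ (cs : List Char), cs.length ≤ n → ∀ (acc : List (List Char)),
      splitTopGo cs acc = acc ++ fSeg cs 0 := by
  induction n with
  | zero =>
    intro cs hlen acc
    have : cs = [] := by cases cs <;> simp_all
    subst this
    rw [splitTopGo]
    cases h : findComma ([] : List Char) 0 with
    | none => simp [fSeg]
    | some pr => simp [findComma] at h
  | succ n ih =>
    intro cs hlen acc
    rw [splitTopGo]
    split
    · rename_i h
      rw [findComma_none_fSeg cs 0 h]
    · rename_i pre rest h
      have hlt := findComma_length cs 0 pre rest h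
      rw [findComma_some_fSeg cs 0 pre rest h]
      rw [ih rest (by omega) (acc ++ [pre]), List.append_assoc, List.singleton_append]

theorem mapHead_nil_append (l : List (List Char)) :
    mapHead (fun x => [] ++ x) l = l := by
  cases l <;> simp [mapHead]

theorem dropT_cons (cur : List Char) (t : List (List Char)) (ht : t ≠ []) :
    dropT (cur :: t) = cur :: dropT t := by
  cases t with
  | nil => exact absurd rfl ht
  | cons b t' =>
    unfold dropT
    simp only [List.getLast?_cons_cons, List.dropLast_cons₂]
    split_ifs <;> rfl

theorem g_eq_dropT (cs : List Char) :
    ∀ (lvl : Int) (cur : List Char),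
      gSeg cs lvl cur = dropT (mapHead (fun x => cur ++ x) (fSeg cs lvl)) := by
  induction cs with
  | nil =>
    intro lvl cur
    simp only [gSeg, fSeg, mapHead, List.append_nil, dropT]
    by_cases h : cur = [] <;> simp [h]
  | cons c cs ih =>
    intro lvl cur
    simp only [gSeg, fSeg]
    by_cases h : c = ',' ∧ lvl = 0
    · simp only [if_pos h]
      have hne : fSeg cs 0 ≠ [] := fSeg_ne_nil cs 0
      simp only [mapHead, List.append_nil]
      rw [dropT_cons cur _ hne, ih 0 [], mapHead_nil_append]
    · simp only [if_neg h]
      cases hf : fSeg cs (if c = '(' then lvl + 1 else if c = ')' then lvl - 1 else lvl) with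
      | nil => exact absurd hf (fSeg_ne_nil cs _)
      | cons s t =>
        rw [ih _ (cur ++ [c])]
        rw [hf]
        simp [mapHead]

theorem segs_eq (cs : List Char) :
    (if (cs.foldl stepA ([], [], 0)).2.1 ≠ [] then
       (cs.foldl stepA ([], [], 0)).1 ++ [(cs.foldl stepA ([], [], 0)).2.1]
     else (cs.foldl stepA ([], [], 0)).1) =
    (if (splitTopGo cs []).getLast? = some [] then (splitTopGo cs []).dropLast
     else splitTopGo cs []) := by
  have h1 := A_loop cs [] [] 0
  simp only [List.nil_append] at h1
  rw [h1, splitTopGo_eq cs.length cs (le_refl _) []]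
  simp only [List.nil_append]
  rw [g_eq_dropT cs 0 [], mapHead_nil_append]
  rfl

-- ===== VERDICT (by name: the statement is the Claim_ definition above) =====
theorem parse_atom_spec : Claim_equal_parse_atom := by
  intro atom _
  unfold Spec_parse_atom parse_atom parse_atom_alt
  simp only []
  split
  · rfl
  · exact congrArg (Prod.mk _) (congrArg (List.map String.ofList) (segs_eq _))
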